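-- pv_equiv track=rewrite | github.com/cancelself/HelloWorld | src/clawnet_transport.py | _parse_hw_content
-- ===== SOURCE A (Python) =====
-- def _parse_hw_content(raw: str) -> tuple:
--     """Extract (sender, timestamp, body) from HelloWorld-formatted content."""
--     sender = ""
--     timestamp = ""
--     content_start = 0
--
--     lines = raw.split("\n")
--     for i, line in enumerate(lines):
--         if line.startswith("# From:"):
--             sender = line.split(":", 1)[1].strip()
--         elif line.startswith("# Timestamp:"):
--             timestamp = line.split(":", 1)[1].strip()
--         elif not line.startswith("#") and line.strip():
--             content_start = i
--             break
--
--     body = "\n".join(lines[content_start:]).strip()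
--     return sender, timestamp, body
-- ===== SOURCE B (Python) =====
-- def _parse_hw_content(raw: str) -> tuple:
--     """Extract (sender, timestamp, body): two-pass decomposition —
--     locate the body start, then pull each header field out of the
--     header region by scanning it backwards for the last match."""
--     lines = raw.split("\n")
--
--     # Pass 1: index of the first non-comment, non-blank line (None if no body).
--     content_start = next(
--         (i for i, line in enumerate(lines)
--          if not line.startswith("#") and line.strip()),
--         None,
--     )
--
--     # Pass 2: headers live before the body (everywhere if no body line);
--     # the last occurrence wins, so scan the region backwards for the first hit.
--     header = lines if content_start is None else lines[:content_start]
--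
--     def last_field(prefix):
--         return next(
--             (line.split(":", 1)[1].strip()
--              for line in reversed(header) if line.startswith(prefix)),
--             "",
--         )
--
--     sender = last_field("# From:")
--     timestamp = last_field("# Timestamp:")
--     body = "\n".join(lines[0 if content_start is None else content_start:]).strip()
--     return sender, timestamp, body
-- ===== Notes on version B (the rewrite author's own statement) =====
-- stated objective: alternative
-- what changed: Replaces A's single break-out loop that interleaves header capture with body detection by a two-pass decomposition: first locate the body start index, then extract sender/timestamp (last-match-wins) from the header region alone, then join the tail.
import Mathlib
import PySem

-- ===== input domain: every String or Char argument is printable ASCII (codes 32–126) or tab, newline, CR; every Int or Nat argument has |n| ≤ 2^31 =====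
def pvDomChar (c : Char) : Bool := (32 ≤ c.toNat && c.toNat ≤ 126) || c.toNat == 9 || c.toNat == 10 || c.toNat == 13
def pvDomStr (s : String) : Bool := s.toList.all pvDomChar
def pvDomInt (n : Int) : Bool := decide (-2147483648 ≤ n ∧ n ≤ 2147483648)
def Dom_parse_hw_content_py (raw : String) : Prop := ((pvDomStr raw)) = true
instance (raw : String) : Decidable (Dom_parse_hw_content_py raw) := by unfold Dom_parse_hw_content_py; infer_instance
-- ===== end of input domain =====

-- B restructures A's single break-loop into two passes: find the body start, then
-- read headers from the header region; objective: alternative decomposition (same cost).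

-- shared micro-step: line.split(":", 1)[1].strip()  (both Pythons contain this expression verbatim)
def pvHeaderVal (line : String) : String :=
  PySem.Str.strip ((((PySem.Str.splitMax? line ":" 1).getD []).getD 1 ""))

-- ===== PORT A =====
-- A's single loop: header matches update state, first body line breaks with its index.
def pvALoop : List String → Nat → String → String → String × String × Nat
  | [], _, s, t => (s, t, 0)
  | l :: ls, i, s, t =>
    if PySem.Str.startswith l "# From:" then pvALoop ls (i + 1) (pvHeaderVal l) t
    else if PySem.Str.startswith l "# Timestamp:" then pvALoop ls (i + 1) s (pvHeaderVal l)
    else if !PySem.Str.startswith l "#" && PySem.Str.strip l != "" then (s, t, i)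
    else pvALoop ls (i + 1) s t

def parse_hw_content_py (raw : String) : String × String × String :=
  let lines := (PySem.Str.split? raw "\n").getD []
  let r := pvALoop lines 0 "" ""
  (r.1, r.2.1, PySem.Str.strip (PySem.Str.join "\n" (PySem.List.slice lines (some (r.2.2 : Int)) none)))

-- ===== PORT B =====
-- pass 1: index of the first non-comment, non-blank line (next(..., None))
def pvFindBody : List String → Option Nat
  | [] => none
  | l :: ls =>
    if !PySem.Str.startswith l "#" && PySem.Str.strip l != "" then some 0
    else (pvFindBody ls).map (· + 1)

-- pass 2: last matching header field = first match scanning the region backwards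
def pvLastField (pre : String) (header : List String) : String :=
  match header.reverse.find? (fun l => PySem.Str.startswith l pre) with
  | some l => pvHeaderVal l
  | none => ""

def parse_hw_content_py_alt (raw : String) : String × String × String :=
  let lines := (PySem.Str.split? raw "\n").getD []
  let cs? := pvFindBody lines
  let header := match cs? with | none => lines | some cs => lines.take cs
  let sender := pvLastField "# From:" header
  let timestamp := pvLastField "# Timestamp:" header
  (sender, timestamp, PySem.Str.strip (PySem.Str.join "\n" (lines.drop (cs?.getD 0))))

-- ===== PRECONDITION & SPEC =====
def Spec_parse_hw_content_py (raw : String) (out : String × String × String) : Prop := out = parse_hw_content_py_alt raw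
instance (raw : String) (out : String × String × String) : Decidable (Spec_parse_hw_content_py raw out) := by unfold Spec_parse_hw_content_py; infer_instance

-- ===== CLAIM (what is proved, stated in full; the proofs are below) =====
def Claim_equal_parse_hw_content_py : Prop := ∀ (raw : String), Dom_parse_hw_content_py raw → Spec_parse_hw_content_py raw (parse_hw_content_py raw)

-- ===== LEMMAS AND PROOFS =====

-- proof-side: A's header state update and fold from an arbitrary state
def pvStep (st : String × String) (l : String) : String × String :=
  if PySem.Str.startswith l "# From:" then (pvHeaderVal l, st.2)
  else if PySem.Str.startswith l "# Timestamp:" then (st.1, pvHeaderVal l)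
  else st

def pvHeadersFrom (st : String × String) (region : List String) : String × String :=
  region.foldl pvStep st

theorem pvNot_both (l : String) (hf : PySem.Str.startswith l "# From:" = true)
    (ht : PySem.Str.startswith l "# Timestamp:" = true) : False := by
  simp only [PySem.Str.startswith_eq, PySem.Chars.startswith_iff] at hf ht
  have := List.prefix_of_prefix_length_le hf ht (by decide)
  exact absurd this (by decide)

theorem pvFst_headersFrom (ls : List String) : ∀ (s t : String),
    (pvHeadersFrom (s, t) ls).1 =
      match ls.reverse.find? (fun l => PySem.Str.startswith l "# From:") with
      | some l => pvHeaderVal l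
      | none => s := by
  induction ls with
  | nil => intro s t; simp [pvHeadersFrom]
  | cons l ls ih =>
    intro s t
    rw [show pvHeadersFrom (s, t) (l :: ls) = pvHeadersFrom (pvStep (s, t) l) ls from rfl]
    have hst : pvStep (s, t) l = ((pvStep (s, t) l).1, (pvStep (s, t) l).2) := rfl
    rw [hst, ih]
    rw [List.reverse_cons, List.find?_append]
    cases hr : ls.reverse.find? (fun l => PySem.Str.startswith l "# From:") with
    | some l' => simp
    | none =>
      simp only [Option.or]
      by_cases hf : PySem.Str.startswith l "# From:" = true
      · simp at hf
        simp [pvStep, hf]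
      · by_cases ht : PySem.Str.startswith l "# Timestamp:" = true
        · simp at hf ht
          simp [pvStep, hf, ht]
        · simp at hf ht
          simp [pvStep, hf, ht]

theorem pvSnd_headersFrom (ls : List String) : ∀ (s t : String),
    (pvHeadersFrom (s, t) ls).2 =
      match ls.reverse.find? (fun l => PySem.Str.startswith l "# Timestamp:") with
      | some l => pvHeaderVal l
      | none => t := by
  induction ls with
  | nil => intro s t; simp [pvHeadersFrom]
  | cons l ls ih =>
    intro s t
    rw [show pvHeadersFrom (s, t) (l :: ls) = pvHeadersFrom (pvStep (s, t) l) ls from rfl]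
    have hst : pvStep (s, t) l = ((pvStep (s, t) l).1, (pvStep (s, t) l).2) := rfl
    rw [hst, ih]
    rw [List.reverse_cons, List.find?_append]
    cases hr : ls.reverse.find? (fun l => PySem.Str.startswith l "# Timestamp:") with
    | some l' => simp
    | none =>
      simp only [Option.or]
      by_cases ht : PySem.Str.startswith l "# Timestamp:" = true
      · have hf : PySem.Str.startswith l "# From:" = false := by
          by_contra h
          exact pvNot_both l (by simpa using h) ht
        simp at hf ht
        simp [pvStep, hf, ht]
      · by_cases hf : PySem.Str.startswith l "# From:" = true
        · simp at hf ht
          simp [pvStep, hf, ht]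
        · simp at hf ht
          simp [pvStep, hf, ht]

theorem pvLastField_from (header : List String) (t : String) :
    pvLastField "# From:" header = (pvHeadersFrom ("", t) header).1 := by
  rw [pvFst_headersFrom, pvLastField]

theorem pvLastField_ts (header : List String) (s : String) :
    pvLastField "# Timestamp:" header = (pvHeadersFrom (s, "") header).2 := by
  rw [pvSnd_headersFrom, pvLastField]

-- header fold with an arbitrary starting state
theorem pvHeadersFrom_cons (st : String × String) (l : String) (ls : List String) :
    pvHeadersFrom st (l :: ls) = pvHeadersFrom (pvStep st l) ls := rfl

theorem pvALoop_eq (ls : List String) : ∀ (i : Nat) (s t : String),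
    pvALoop ls i s t =
      match pvFindBody ls with
      | some j => ((pvHeadersFrom (s, t) (ls.take j)).1, (pvHeadersFrom (s, t) (ls.take j)).2, i + j)
      | none => ((pvHeadersFrom (s, t) ls).1, (pvHeadersFrom (s, t) ls).2, 0) := by
  induction ls with
  | nil => intro i s t; simp [pvALoop, pvFindBody, pvHeadersFrom]
  | cons l ls ih =>
    intro i s t
    by_cases hf : PySem.Str.startswith l "# From:" = true
    · simp at hf
      have h1 : PySem.Chars.startswith l.toList ['#'] = true := by
        rw [PySem.Chars.startswith_iff] at hf ⊢
        exact List.IsPrefix.trans (by decide) hf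
      have hA : pvALoop (l :: ls) i s t = pvALoop ls (i + 1) (pvHeaderVal l) t := by
        simp [pvALoop, hf]
      have hF : pvFindBody (l :: ls) = (pvFindBody ls).map (· + 1) := by
        simp [pvFindBody, h1]
      have hstep : pvStep (s, t) l = (pvHeaderVal l, t) := by simp [pvStep, hf]
      rw [hA, ih, hF]
      cases hj : pvFindBody ls with
      | none => simp [pvHeadersFrom_cons, hstep]
      | some j =>
        simp [List.take_succ_cons, pvHeadersFrom_cons, hstep, Nat.add_assoc, Nat.add_comm 1 j]
    · by_cases ht : PySem.Str.startswith l "# Timestamp:" = true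
      · simp at hf ht
        have h1 : PySem.Chars.startswith l.toList ['#'] = true := by
          rw [PySem.Chars.startswith_iff] at ht ⊢
          exact List.IsPrefix.trans (by decide) ht
        have hA : pvALoop (l :: ls) i s t = pvALoop ls (i + 1) s (pvHeaderVal l) := by
          simp [pvALoop, hf, ht]
        have hF : pvFindBody (l :: ls) = (pvFindBody ls).map (· + 1) := by
          simp [pvFindBody, h1]
        have hstep : pvStep (s, t) l = (s, pvHeaderVal l) := by simp [pvStep, hf, ht]
        rw [hA, ih, hF]
        cases hj : pvFindBody ls with
        | none => simp [pvHeadersFrom_cons, hstep]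
        | some j =>
          simp [List.take_succ_cons, pvHeadersFrom_cons, hstep, Nat.add_assoc, Nat.add_comm 1 j]
      · by_cases hb : (!PySem.Str.startswith l "#" && PySem.Str.strip l != "") = true
        · simp at hf ht hb
          have hA : pvALoop (l :: ls) i s t = (s, t, i) := by
            simp [pvALoop, hf, ht, hb.1, hb.2]
          have hF : pvFindBody (l :: ls) = some 0 := by simp [pvFindBody, hb.1, hb.2]
          rw [hA, hF]
          simp [pvHeadersFrom]
        · simp at hf ht hb
          have hc : ¬ (PySem.Chars.startswith l.toList ['#'] = false ∧ ¬ PySem.Str.strip l = "") := by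
            rintro ⟨h1, h2⟩; exact h2 (hb h1)
          have hA : pvALoop (l :: ls) i s t = pvALoop ls (i + 1) s t := by
            simp [pvALoop, hf, ht, hc]
          have hF : pvFindBody (l :: ls) = (pvFindBody ls).map (· + 1) := by
            simp [pvFindBody, hc]
          have hstep : pvStep (s, t) l = (s, t) := by simp [pvStep, hf, ht]
          rw [hA, ih, hF]
          cases hj : pvFindBody ls with
          | none => simp [pvHeadersFrom_cons, hstep]
          | some j =>
            simp [List.take_succ_cons, pvHeadersFrom_cons, hstep, Nat.add_assoc, Nat.add_comm 1 j]

-- ===== VERDICT (by name: the statement is the Claim_ definition above) =====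
theorem parse_hw_content_py_spec : Claim_equal_parse_hw_content_py := by
  intro raw _
  unfold Spec_parse_hw_content_py parse_hw_content_py parse_hw_content_py_alt
  dsimp only
  rw [pvALoop_eq]
  cases hj : pvFindBody ((PySem.Str.split? raw "\n").getD []) with
  | none =>
    simp [pvLastField_from _ "", pvLastField_ts _ "", PySem.List.slice]
  | some j =>
    have hs : PySem.List.slice ((PySem.Str.split? raw "\n").getD []) (some (j : Int)) none
        = ((PySem.Str.split? raw "\n").getD []).drop j := by
      simp [pysem]
    simp [pvLastField_from _ "", pvLastField_ts _ "", hs]
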